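-- pv_equiv track=rewrite | github.com/kristofXen/training_busride | easyrider.py | count_stops
-- ===== SOURCE A (Python) =====
-- def count_stops(dl):
--     stop_d = dict()
--     for d in dl:
--         for k, v in d.items():
--             if k == 'bus_id':
--                 if v in stop_d:
--                     stop_d[v] = stop_d[v] + 1
--                 else:
--                     stop_d[v] = 1
--
--     return dict(sorted(stop_d.items()))
-- ===== SOURCE B (Python) =====
-- def count_stops(dl):
--     vals = sorted(d['bus_id'] for d in dl if 'bus_id' in d)
--     if not vals:
--         return {}
--     res = {}
--     cur, cnt = vals[0], 1
--     for v in vals[1:]: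
--         if v == cur:
--             cnt += 1
--         else:
--             res[cur] = cnt
--             cur, cnt = v, 1
--     res[cur] = cnt
--     return res
-- ===== Notes on version B (the rewrite author's own statement) =====
-- stated objective: alternative
-- what changed: Instead of scanning every key of every dict into a counting dict and sorting the items at the end, B extracts the 'bus_id' value per dict by a single lookup, sorts the values, and builds the already-ordered result by run-length encoding the sorted list.
import Mathlib
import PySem

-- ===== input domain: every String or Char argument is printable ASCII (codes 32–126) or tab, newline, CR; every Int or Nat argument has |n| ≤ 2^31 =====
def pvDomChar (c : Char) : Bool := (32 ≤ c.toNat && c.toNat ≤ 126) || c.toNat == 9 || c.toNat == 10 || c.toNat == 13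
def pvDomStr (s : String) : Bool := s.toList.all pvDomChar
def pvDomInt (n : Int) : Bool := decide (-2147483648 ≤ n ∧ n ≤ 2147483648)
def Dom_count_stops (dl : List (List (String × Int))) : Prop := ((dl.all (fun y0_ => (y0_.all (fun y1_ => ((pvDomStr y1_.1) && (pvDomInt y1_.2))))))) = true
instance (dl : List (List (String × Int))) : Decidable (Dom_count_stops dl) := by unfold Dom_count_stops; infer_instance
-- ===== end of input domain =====

-- B replaces A's scan of every key/value pair into a counting dict + final sort by a single
-- 'bus_id' lookup per dict, a sort of the values, and a run-length encoding of the sorted list.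


-- ===== PORT A =====
def count_stops (dl : List (List (String × Int))) : List (Int × Int) :=
  let stop_d : PySem.Dict Int Int :=
    dl.foldl (fun stop_d d =>
      (PySem.Dict.ofList d).items.foldl (fun stop_d kv =>
        if kv.1 == "bus_id" then
          if stop_d.contains kv.2 then stop_d.insert kv.2 (stop_d.getD kv.2 0 + 1)
          else stop_d.insert kv.2 1
        else stop_d) stop_d) PySem.Dict.empty
  PySem.List.sorted stop_d.items (fun p => (toLex p : Lex (Int × Int)))

-- ===== PORT B =====
-- run-length encoding of the (sorted) tail, carrying the current value and its running count
def rleCount (v cnt : Int) : List Int → List (Int × Int)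
  | [] => [(v, cnt)]
  | x :: xs => if x = v then rleCount v (cnt + 1) xs else (v, cnt) :: rleCount x 1 xs

def count_stops_alt (dl : List (List (String × Int))) : List (Int × Int) :=
  let vals := PySem.List.sorted (dl.filterMap (fun d => (PySem.Dict.ofList d).get? "bus_id")) (fun v => v)
  match vals with
  | [] => []
  | x :: xs => rleCount x 1 xs

-- ===== PRECONDITION & SPEC =====
def Spec_count_stops (dl : List (List (String × Int))) (out : List (Int × Int)) : Prop := out = count_stops_alt dl
instance (dl : List (List (String × Int))) (out : List (Int × Int)) : Decidable (Spec_count_stops dl out) := by unfold Spec_count_stops; infer_instance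

-- ===== CLAIM (what is proved, stated in full; the proofs are below) =====
def Claim_equal_count_stops : Prop := ∀ (dl : List (List (String × Int))), Dom_count_stops dl → Spec_count_stops dl (count_stops dl)

-- ===== LEMMAS AND PROOFS =====

-- the multiset of counted values: the 'bus_id' entry of each dict that has one
def busVals (dl : List (List (String × Int))) : List Int :=
  dl.filterMap (fun d => (PySem.Dict.ofList d).get? "bus_id")

-- with nodup keys, filtering an assoc list by a key keeps exactly the found entry
lemma filter_items_eq (s : String) : ∀ (l : List (String × Int)), (l.map Prod.fst).Nodup →
    l.filter (fun kv => kv.1 == s) = ((PySem.Dict.mk l).get? s).elim [] (fun v => [(s, v)]) := by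
  intro l
  induction l with
  | nil => intro _; rfl
  | cons kv l ih =>
    intro hn
    simp only [List.map_cons, List.nodup_cons] at hn
    by_cases h : kv.1 = s
    · subst h
      have hnil : l.filter (fun kv2 => kv2.1 == kv.1) = [] := by
        rw [List.filter_eq_nil_iff]
        intro a ha
        simp only [beq_iff_eq]
        intro hc
        exact hn.1 (by rw [← hc]; exact List.mem_map_of_mem ha)
      simp [PySem.Dict.get?, List.find?, hnil]
    · have hb : (kv.1 == s) = false := by simp [h]
      simp only [List.filter_cons, hb]
      rw [ih hn.2]
      simp [PySem.Dict.get?, List.find?, hb]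

-- a fold over an Option.elim of each element is a fold over the filterMap
lemma foldl_filterMap_opt {α β γ : Type} (opt : α → Option β) (g : γ → β → γ) :
    ∀ (l : List α) (init : γ),
      l.foldl (fun acc d => (opt d).elim acc (fun v => g acc v)) init = (l.filterMap opt).foldl g init := by
  intro l
  induction l with
  | nil => intro _; rfl
  | cons d l ih =>
    intro init
    cases h : opt d <;> simp [h, ih]

-- PySem.Set.ofList commutes with filter
lemma ofList_filter (p : Int → Bool) : ∀ (l : List Int),
    (PySem.Set.ofList l).filter p = PySem.Set.ofList (l.filter p) := by
  intro l
  induction l with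
  | nil => rfl
  | cons x l ih =>
    rw [PySem.Set.ofList_cons, List.filter_cons, List.filter_cons]
    simp only [PySem.Set.discard]
    by_cases hp : p x = true
    · rw [if_pos hp, if_pos hp, PySem.Set.ofList_cons]
      simp only [PySem.Set.discard]
      rw [List.filter_comm, ih]
    · rw [if_neg hp, if_neg hp, List.filter_comm, ih]
      apply List.filter_eq_self.mpr
      intro y hy
      have hmem : y ∈ l.filter p := (PySem.Set.mem_ofList _ _).mp hy
      have hpy := List.of_mem_filter hmem
      have hne : y ≠ x := fun hyx => hp (by rw [← hyx]; exact hpy)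
      simp [hne]

-- ofList keeps first occurrences: a sublist
lemma ofList_sublist : ∀ (l : List Int), (PySem.Set.ofList l).Sublist l := by
  intro l
  induction l with
  | nil => simp [PySem.Set.ofList_nil]
  | cons x l ih =>
    rw [PySem.Set.ofList_cons]
    simp only [PySem.Set.discard]
    exact List.Sublist.cons₂ x (List.filter_sublist.trans ih)

-- run-length encoding of a sorted tail, closed form
lemma rleCount_sorted : ∀ (xs : List Int) (v cnt : Int),
    xs.Pairwise (· ≤ ·) → (∀ y ∈ xs, v ≤ y) →
    rleCount v cnt xs = (v, cnt + (xs.count v : Int)) ::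
      (PySem.Set.ofList (xs.filter (fun y => decide (v < y)))).map (fun k => (k, (xs.count k : Int))) := by
  intro xs
  induction xs with
  | nil => intro v cnt _ _; simp [rleCount, PySem.Set.ofList_nil]
  | cons x xs ih =>
    intro v cnt hp hb
    rw [List.pairwise_cons] at hp
    obtain ⟨hx, hxs⟩ := hp
    have hvx : v ≤ x := hb x (List.mem_cons_self)
    by_cases h : x = v
    · subst h
      rw [show rleCount x cnt (x :: xs) = rleCount x (cnt + 1) xs from by simp [rleCount]]
      rw [ih x (cnt + 1) hxs hx]
      have hdx : (decide (x < x)) = false := by simp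
      simp only [List.count_cons_self, List.filter_cons, hdx, List.cons.injEq, Prod.mk.injEq]
      refine ⟨⟨by trivial, by push_cast; ring⟩, ?_⟩
      apply List.map_congr_left
      intro k hk
      have hkf : k ∈ xs.filter (fun y => decide (x < y)) := (PySem.Set.mem_ofList _ _).mp hk
      have hlt : x < k := by simpa using List.of_mem_filter hkf
      rw [List.count_cons_of_ne (by omega)]
    · have hvltx : v < x := lt_of_le_of_ne hvx (fun he => h he.symm)
      rw [show rleCount v cnt (x :: xs) = (v, cnt) :: rleCount x 1 xs from by simp [rleCount, h]]
      rw [ih x 1 hxs hx]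
      have hcv : (x :: xs).count v = 0 := by
        rw [List.count_eq_zero]
        intro hmem
        rcases List.mem_cons.mp hmem with he | hm
        · omega
        · have := hx v hm; omega
      have hfil : (x :: xs).filter (fun y => decide (v < y)) = x :: xs.filter (fun y => decide (v < y)) := by
        simp [hvltx]
      have hfx : xs.filter (fun y => decide (v < y)) = xs := by
        apply List.filter_eq_self.mpr
        intro y hy
        have := hx y hy
        simp; omega
      rw [hcv, hfil, hfx, PySem.Set.ofList_cons]
      have hdisc : (PySem.Set.ofList xs).discard x = PySem.Set.ofList (xs.filter (fun y => decide (x < y))) := by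
        show (PySem.Set.ofList xs).filter _ = _
        rw [ofList_filter]
        congr 1
        apply List.filter_congr
        intro y hy
        by_cases hxy : y = x
        · subst hxy; simp
        · have : x < y := lt_of_le_of_ne (hx y hy) (Ne.symm hxy)
          simp [hxy, this]
      rw [hdisc]
      simp only [List.map_cons, List.count_cons_self, List.cons.injEq, Prod.mk.injEq]
      refine ⟨⟨by trivial, by push_cast; ring⟩, ⟨by trivial, by push_cast; ring⟩, ?_⟩
      apply List.map_congr_left
      intro k hk
      have hkf : k ∈ xs.filter (fun y => decide (x < y)) := (PySem.Set.mem_ofList _ _).mp hk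
      have hlt : x < k := by simpa using List.of_mem_filter hkf
      rw [List.count_cons_of_ne (by omega)]

-- B computes the (value, count) list over the distinct sorted values
lemma countB_closed (dl : List (List (String × Int))) :
    count_stops_alt dl = (PySem.Set.ofList (PySem.List.sorted (busVals dl) (fun v => v))).map
      (fun k => (k, ((PySem.List.sorted (busVals dl) (fun v => v)).count k : Int))) := by
  unfold count_stops_alt busVals
  have hs : (PySem.List.sorted (dl.filterMap (fun d => (PySem.Dict.ofList d).get? "bus_id")) (fun v => v)).Pairwise (· ≤ ·) := by
    simpa using PySem.List.sorted_pairwise (dl.filterMap (fun d => (PySem.Dict.ofList d).get? "bus_id")) (fun v : Int => v)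
  set S := PySem.List.sorted (dl.filterMap (fun d => (PySem.Dict.ofList d).get? "bus_id")) (fun v => v) with hS
  cases hc : S with
  | nil =>
    show ([] : List (Int × Int)) = _
    simp [PySem.Set.ofList_nil]
  | cons x xs =>
    rw [hc] at hs
    rw [List.pairwise_cons] at hs
    show rleCount x 1 xs = _
    rw [rleCount_sorted xs x 1 hs.2 hs.1]
    rw [PySem.Set.ofList_cons]
    have hdisc : (PySem.Set.ofList xs).discard x = PySem.Set.ofList (xs.filter (fun y => decide (x < y))) := by
      show (PySem.Set.ofList xs).filter _ = _
      rw [ofList_filter]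
      congr 1
      apply List.filter_congr
      intro y hy
      by_cases hxy : y = x
      · subst hxy; simp
      · have : x < y := lt_of_le_of_ne (hs.1 y hy) (Ne.symm hxy)
        simp [hxy, this]
    rw [hdisc]
    simp only [List.map_cons, List.count_cons_self, List.cons.injEq, Prod.mk.injEq]
    refine ⟨⟨by trivial, by push_cast; ring⟩, ?_⟩
    apply List.map_congr_left
    intro k hk
    have hkf : k ∈ xs.filter (fun y => decide (x < y)) := (PySem.Set.mem_ofList _ _).mp hk
    have hlt : x < k := by simpa using List.of_mem_filter hkf
    rw [List.count_cons_of_ne (by omega)]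

-- A builds the counter of busVals and sorts its items
lemma countA_counter (dl : List (List (String × Int))) :
    count_stops dl = PySem.List.sorted ((PySem.Dict.counter (busVals dl)).items)
      (fun p => (toLex p : Lex (Int × Int))) := by
  have hinner : ∀ (sd : PySem.Dict Int Int) (d : List (String × Int)),
      (PySem.Dict.ofList d).items.foldl (fun sd kv =>
        if kv.1 == "bus_id" then
          if sd.contains kv.2 then sd.insert kv.2 (sd.getD kv.2 0 + 1)
          else sd.insert kv.2 1
        else sd) sd
      = ((PySem.Dict.ofList d).get? "bus_id").elim sd (fun v => sd.insert v (sd.getD v 0 + 1)) := by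
    intro sd d
    rw [PySem.List.foldl_if_eq_foldl_filter (fun kv : String × Int => kv.1 == "bus_id")]
    have hn : ((PySem.Dict.ofList d).items.map Prod.fst).Nodup := PySem.Dict.nodup_keys_ofList d
    rw [filter_items_eq "bus_id" (PySem.Dict.ofList d).items hn]
    cases hg : (PySem.Dict.mk (PySem.Dict.ofList d).items).get? "bus_id" with
    | none => rfl
    | some v =>
      simp only [Option.elim_some, List.foldl_cons, List.foldl_nil]
      by_cases hc : sd.contains v = true
      · simp [hc]
      · have hc' : sd.contains v = false := by simpa using hc
        rw [if_neg (by simp [hc']), PySem.Dict.getD_of_not_contains sd 0 hc']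
        norm_num
  have hfold : List.foldl (fun (stop_d : PySem.Dict Int Int) d =>
        List.foldl (fun stop_d kv =>
          if kv.1 == "bus_id" then
            if stop_d.contains kv.2 then stop_d.insert kv.2 (stop_d.getD kv.2 0 + 1)
            else stop_d.insert kv.2 1
          else stop_d) stop_d (PySem.Dict.ofList d).items) PySem.Dict.empty dl
      = PySem.Dict.counter (busVals dl) := by
    calc List.foldl (fun (stop_d : PySem.Dict Int Int) d =>
          List.foldl (fun stop_d kv =>
            if kv.1 == "bus_id" then
              if stop_d.contains kv.2 then stop_d.insert kv.2 (stop_d.getD kv.2 0 + 1)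
              else stop_d.insert kv.2 1
            else stop_d) stop_d (PySem.Dict.ofList d).items) PySem.Dict.empty dl
        = List.foldl (fun sd d => ((PySem.Dict.ofList d).get? "bus_id").elim sd
            (fun v => sd.insert v (sd.getD v 0 + 1))) PySem.Dict.empty dl := by
          apply PySem.List.foldl_congr_mem
          intro sd d _
          exact hinner sd d
      _ = List.foldl (fun sd v => sd.insert v (sd.getD v 0 + 1)) PySem.Dict.empty (busVals dl) := by
          unfold busVals
          exact foldl_filterMap_opt _ _ dl PySem.Dict.empty
      _ = PySem.Dict.counter (busVals dl) := PySem.Dict.foldl_insert_getD_add_one_eq_counter _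
  unfold count_stops
  rw [hfold]

-- ===== VERDICT (by name: the statement is the Claim_ definition above) =====
theorem count_stops_spec : Claim_equal_count_stops := by
  intro dl _
  show count_stops dl = count_stops_alt dl
  rw [countA_counter, PySem.Dict.items_counter, countB_closed]
  set L := busVals dl with hL
  set S := PySem.List.sorted L (fun v => v) with hS
  have hScount : ∀ k : Int, S.count k = L.count k := fun k =>
    (PySem.List.sorted_perm L (fun v => v) false).count_eq k
  have hperm : (PySem.Set.ofList S).Perm (PySem.Set.ofList L) := by
    rw [List.perm_ext_iff_of_nodup (PySem.Set.nodup_ofList S) (PySem.Set.nodup_ofList L)]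
    intro a
    rw [PySem.Set.mem_ofList, PySem.Set.mem_ofList, PySem.List.mem_sorted]
  have hSle : S.Pairwise (· ≤ ·) := by
    simpa using PySem.List.sorted_pairwise L (fun v : Int => v)
  have hOle : (PySem.Set.ofList S).Pairwise (· ≤ ·) := hSle.sublist (ofList_sublist S)
  have hOlt : (PySem.Set.ofList S).Pairwise (· < ·) := by
    have hnd : (PySem.Set.ofList S).Pairwise (· ≠ ·) := PySem.Set.nodup_ofList S
    exact (hOle.and hnd).imp (fun h => lt_of_le_of_ne h.1 h.2)
  apply PySem.List.sorted_eq_of_perm_of_pairwise_lt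
  · have hmapeq : (PySem.Set.ofList S).map (fun k => (k, (S.count k : Int)))
        = (PySem.Set.ofList S).map (fun k => (k, (L.count k : Int))) := by
      apply List.map_congr_left
      intro k _
      rw [hScount k]
    rw [hmapeq]
    exact hperm.map _
  · rw [List.pairwise_map]
    apply hOlt.imp
    intro a b hab
    rw [Prod.Lex.toLex_lt_toLex]
    exact Or.inl hab
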